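-- pv_equiv track=rewrite | github.com/AHartTN/Hartonomous | src/core/spatial/hilbert_curve.py | _hilbert_3d_encode
-- ===== SOURCE A (Python) =====
-- def _hilbert_3d_encode(x: int, y: int, z: int, order: int) -> int:
--     """
--     Pure Python implementation of 3D Hilbert curve encoding.
--     Based on compact Hilbert indices algorithm.
--     """
--     index = 0
--
--     for i in range(order - 1, -1, -1):
--         # Extract bits at current level
--         xi = (x >> i) & 1
--         yi = (y >> i) & 1
--         zi = (z >> i) & 1
--
--         # Combine into 3-bit index for this level
--         bits = (xi << 2) | (yi << 1) | zi
--
--         # Gray code transformation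
--         bits = _gray_encode_3bit(bits)
--
--         # Add to result
--         index = (index << 3) | bits
--
--     return index
--
-- def _gray_encode_3bit(n: int) -> int:
--     """Gray code encoding for 3-bit value."""
--     return n ^ (n >> 1)
-- ===== SOURCE B (Python) =====
-- def _hilbert_3d_encode(x: int, y: int, z: int, order: int) -> int:
--     # Pass 1: interleave the level bits of x, y, z into a Morton code m.
--     m = 0
--     for i in range(order):
--         bits = (((x >> i) & 1) << 2) | (((y >> i) & 1) << 1) | ((z >> i) & 1)
--         m |= bits << (3 * i)
--     # Pass 2: Gray-encode each 3-bit group of m in place.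
--     index = 0
--     for i in range(order):
--         g = (m >> (3 * i)) & 7
--         index |= (g ^ (g >> 1)) << (3 * i)
--     return index
-- ===== Notes on version B (the rewrite author's own statement) =====
-- stated objective: alternative
-- what changed: B splits A's single fused high-to-low loop into two low-to-high passes over an explicit intermediate Morton code: pass 1 interleaves the coordinate bits into m, pass 2 extracts each 3-bit group of m and Gray-encodes it in place.
import Mathlib
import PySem

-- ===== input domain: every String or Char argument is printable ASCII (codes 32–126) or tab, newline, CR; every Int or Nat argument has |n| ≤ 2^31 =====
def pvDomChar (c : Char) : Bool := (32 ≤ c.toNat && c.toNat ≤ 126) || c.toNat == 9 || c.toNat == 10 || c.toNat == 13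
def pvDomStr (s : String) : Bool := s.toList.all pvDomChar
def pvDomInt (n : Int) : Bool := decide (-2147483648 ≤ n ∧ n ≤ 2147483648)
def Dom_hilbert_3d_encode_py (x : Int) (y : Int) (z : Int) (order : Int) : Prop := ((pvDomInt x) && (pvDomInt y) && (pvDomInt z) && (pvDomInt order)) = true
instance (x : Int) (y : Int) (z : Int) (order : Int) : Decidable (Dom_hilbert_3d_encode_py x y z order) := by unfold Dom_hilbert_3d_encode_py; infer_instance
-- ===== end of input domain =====

-- B replaces A's single fused high-to-low loop by two low-to-high passes over an
-- explicit intermediate Morton code (interleave, then Gray-encode each 3-bit group);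
-- objective: alternative decomposition, same cost.

-- ===== PORT A =====
-- _gray_encode_3bit
def gray_encode_3bit_py (n : Int) : Int := PySem.Int.bxor n (n >>> (1 : Nat))

-- the 'for i in range(order-1, -1, -1)' loop of A: the counter n+1 means the next i is n
def hilbertLoopA (x y z : Int) : Nat → Int → Int
  | 0, index => index
  | n+1, index =>
      let xi := PySem.Int.band (x >>> n) 1
      let yi := PySem.Int.band (y >>> n) 1
      let zi := PySem.Int.band (z >>> n) 1
      let bits := PySem.Int.bor (PySem.Int.bor (xi <<< 2) (yi <<< 1)) zi
      hilbertLoopA x y z n (PySem.Int.bor (index <<< 3) (gray_encode_3bit_py bits))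

def hilbert_3d_encode_py (x : Int) (y : Int) (z : Int) (order : Int) : Int :=
  hilbertLoopA x y z order.toNat 0

-- ===== PORT B =====
-- the 3-bit group  (((x>>i)&1)<<2) | (((y>>i)&1)<<1) | ((z>>i)&1)  of B's first pass
def mortonBits (x y z : Int) (i : Nat) : Int :=
  PySem.Int.bor (PySem.Int.bor ((PySem.Int.band (x >>> i) 1) <<< 2)
                               ((PySem.Int.band (y >>> i) 1) <<< 1))
                (PySem.Int.band (z >>> i) 1)

-- pass 1: 'for i in range(order): m |= bits << (3*i)'
def mortonLoop (x y z : Int) : Nat → Int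
  | 0 => 0
  | n+1 => PySem.Int.bor (mortonLoop x y z n) (mortonBits x y z n <<< (3*n))

-- pass 2: 'for i in range(order): g = (m >> (3*i)) & 7; index |= (g ^ (g >> 1)) << (3*i)'
def grayLoop (m : Int) : Nat → Int
  | 0 => 0
  | n+1 =>
      let g := PySem.Int.band (m >>> (3*n)) 7
      PySem.Int.bor (grayLoop m n) ((PySem.Int.bxor g (g >>> (1 : Nat))) <<< (3*n))

def hilbert_3d_encode_py_alt (x : Int) (y : Int) (z : Int) (order : Int) : Int :=
  grayLoop (mortonLoop x y z order.toNat) order.toNat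

-- ===== PRECONDITION & SPEC =====
def Spec_hilbert_3d_encode_py (x : Int) (y : Int) (z : Int) (order : Int) (out : Int) : Prop := out = hilbert_3d_encode_py_alt x y z order
instance (x : Int) (y : Int) (z : Int) (order : Int) (out : Int) : Decidable (Spec_hilbert_3d_encode_py x y z order out) := by unfold Spec_hilbert_3d_encode_py; infer_instance

-- ===== CLAIM (what is proved, stated in full; the proofs are below) =====
def Claim_equal_hilbert_3d_encode_py : Prop := ∀ (x : Int) (y : Int) (z : Int) (order : Int), Dom_hilbert_3d_encode_py x y z order → Spec_hilbert_3d_encode_py x y z order (hilbert_3d_encode_py x y z order)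

-- ===== LEMMAS AND PROOFS =====

-- Nat abstraction of the per-level 3-bit group
def bFun (x y z : Int) (i : Nat) : Nat := (mortonBits x y z i).toNat

-- Nat Gray code of a 3-bit value
def grayN (v : Nat) : Nat := v ^^^ (v >>> 1)

-- Nat model of the Morton code after n levels
def mFun (x y z : Int) : Nat → Nat
  | 0 => 0
  | n+1 => mFun x y z n + bFun x y z n * 8^n

-- Nat model of the final index after n levels
def sFun (x y z : Int) : Nat → Nat
  | 0 => 0
  | n+1 => sFun x y z n + grayN (bFun x y z n) * 8^n

lemma orAdd : ∀ (k a b : Nat), b < 2^k → a * 2^k ||| b = a * 2^k + b := by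
  intro k
  induction k with
  | zero => intro a b hb; interval_cases b; simp
  | succ k ih =>
    intro a b hb
    have hb2 : b / 2 < 2 ^ k := by omega
    have h1 : a * 2 ^ (k+1) = Nat.bit false (a * 2 ^ k) := by simp [Nat.bit]; ring
    have h2 : b = Nat.bit (decide (b % 2 = 1)) (b / 2) := by
      rcases Nat.mod_two_eq_zero_or_one b with h | h <;> simp [Nat.bit, h] <;> omega
    calc a * 2^(k+1) ||| b
        = Nat.bit false (a*2^k) ||| Nat.bit (decide (b%2=1)) (b/2) := by rw [← h1, ← h2]
      _ = Nat.bit (false || decide (b%2=1)) ((a*2^k) ||| (b/2)) := Nat.lor_bit ..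
      _ = Nat.bit (decide (b%2=1)) (a*2^k + b/2) := by rw [ih _ _ hb2]; simp
      _ = a * 2^(k+1) + b := by
          rcases Nat.mod_two_eq_zero_or_one b with h | h <;> simp [Nat.bit, h] <;> ring_nf <;> omega

-- Python's  (a << k) | b  is  a * 2^k + b  on naturals when b < 2^k
lemma castShiftRight (n s : Nat) : ((n : Int) >>> s) = ((n >>> s : Nat) : Int) := by
  simp [Int.natCast_shiftRight]

lemma int_shl_or (a b k : Nat) (hb : b < 2^k) :
    PySem.Int.bor ((a : Int) <<< k) (b : Int) = ((a * 2^k + b : Nat) : Int) := by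
  rw [← Int.natCast_shiftLeft, PySem.Int.bor_natCast, Nat.shiftLeft_eq, orAdd k a b hb]

lemma band1 (w : Int) : PySem.Int.band w 1 = 0 ∨ PySem.Int.band w 1 = 1 := by
  rw [PySem.Int.band_one]
  have h1 := PySem.Int.mod_nonneg w (b := 2) (by norm_num)
  have h2 := PySem.Int.mod_lt w (b := 2) (by norm_num)
  omega

lemma mortonBits_spec (x y z : Int) (i : Nat) :
    mortonBits x y z i = ((bFun x y z i : Nat) : Int) ∧ bFun x y z i < 8 := by
  have h : ∃ b : Nat, mortonBits x y z i = (b : Int) ∧ b < 8 := by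
    unfold mortonBits
    rcases band1 (x >>> i) with hx | hx <;> rcases band1 (y >>> i) with hy | hy <;>
      rcases band1 (z >>> i) with hz | hz <;> rw [hx, hy, hz] <;>
      first
        | exact ⟨0, by decide, by decide⟩
        | exact ⟨1, by decide, by decide⟩
        | exact ⟨2, by decide, by decide⟩
        | exact ⟨3, by decide, by decide⟩
        | exact ⟨4, by decide, by decide⟩
        | exact ⟨5, by decide, by decide⟩
        | exact ⟨6, by decide, by decide⟩
        | exact ⟨7, by decide, by decide⟩
  obtain ⟨b, hb, hlt⟩ := h
  have : bFun x y z i = b := by unfold bFun; rw [hb]; exact Int.toNat_natCast b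
  constructor
  · rw [this]; exact hb
  · omega

lemma grayN_lt (v : Nat) (h : v < 8) : grayN v < 8 := by
  interval_cases v <;> decide

lemma mFun_lt (x y z : Int) (n : Nat) : mFun x y z n < 8^n := by
  induction n with
  | zero => simp [mFun]
  | succ n ih =>
    have hb := (mortonBits_spec x y z n).2
    have h1 : bFun x y z n * 8^n ≤ 7 * 8^n := Nat.mul_le_mul_right _ (by omega)
    have h8 : (8:Nat)^(n+1) = 8 * 8^n := by ring
    simp only [mFun]
    linarith

lemma sFun_lt (x y z : Int) (n : Nat) : sFun x y z n < 8^n := by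
  induction n with
  | zero => simp [sFun]
  | succ n ih =>
    have hb := grayN_lt _ (mortonBits_spec x y z n).2
    have h1 : grayN (bFun x y z n) * 8^n ≤ 7 * 8^n := Nat.mul_le_mul_right _ (by omega)
    have h8 : (8:Nat)^(n+1) = 8 * 8^n := by ring
    simp only [sFun]
    linarith

lemma pow8 (n : Nat) : (8:Nat)^n = 2^(3*n) := by
  rw [pow_mul]; norm_num

-- extraction: group k of the Morton value is the k-th 3-bit group
lemma mFun_extract (x y z : Int) (n k : Nat) (hk : k < n) :
    (mFun x y z n >>> (3*k)) &&& 7 = bFun x y z k := by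
  induction n with
  | zero => omega
  | succ n ih =>
    have hbn := (mortonBits_spec x y z n).2
    rw [Nat.shiftRight_eq_div_pow, Nat.and_two_pow_sub_one_eq_mod _ 3]
    rcases Nat.lt_or_ge k n with h | h
    · have hsplit : (2:Nat)^(3*n) = 2^(3*(n-k)) * 2^(3*k) := by
        rw [← pow_add]; congr 1; omega
      have hdiv : mFun x y z (n+1) / 2^(3*k)
          = mFun x y z n / 2^(3*k) + bFun x y z n * 2^(3*(n-k)) := by
        simp only [mFun, pow8, hsplit, ← mul_assoc]
        exact Nat.add_mul_div_right _ _ (Nat.two_pow_pos _)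
      have hmul : (2:Nat)^(3*(n-k)) = 2^(3*(n-k)-3) * 8 := by
        rw [show (8:Nat) = 2^3 by norm_num, ← pow_add]; congr 1; omega
      rw [hdiv, hmul, ← mul_assoc, Nat.add_mul_mod_self_right]
      have := ih h
      rw [Nat.shiftRight_eq_div_pow, Nat.and_two_pow_sub_one_eq_mod _ 3] at this
      exact this
    · have hkn : k = n := by omega
      subst hkn
      have hdiv : mFun x y z (k+1) / 2^(3*k) = mFun x y z k / 2^(3*k) + bFun x y z k := by
        simp only [mFun, pow8]
        exact Nat.add_mul_div_right _ _ (Nat.two_pow_pos _)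
      have h0 : mFun x y z k / 2^(3*k) = 0 :=
        Nat.div_eq_of_lt (by rw [← pow8]; exact mFun_lt x y z k)
      rw [hdiv, h0, Nat.zero_add]
      exact Nat.mod_eq_of_lt (by omega)

-- pass 1 computes the Nat Morton model
lemma mortonLoop_eq (x y z : Int) (n : Nat) :
    mortonLoop x y z n = ((mFun x y z n : Nat) : Int) := by
  induction n with
  | zero => simp [mortonLoop, mFun]
  | succ n ih =>
    have hb := mortonBits_spec x y z n
    rw [mortonLoop, ih, hb.1, PySem.Int.bor_comm]
    have := int_shl_or (bFun x y z n) (mFun x y z n) (3*n)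
      (by rw [← pow8]; exact mFun_lt x y z n)
    rw [this]
    simp only [mFun, pow8]
    push_cast
    ring

-- pass 2 computes the Nat index model
lemma grayLoop_eq (x y z : Int) (N : Nat) :
    ∀ n, n ≤ N → grayLoop ((mFun x y z N : Nat) : Int) n = ((sFun x y z n : Nat) : Int) := by
  intro n
  induction n with
  | zero => intro _; simp [grayLoop, sFun]
  | succ n ih =>
    intro hn
    have hext : PySem.Int.band (((mFun x y z N : Nat) : Int) >>> (3*n)) 7
        = ((bFun x y z n : Nat) : Int) := by
      rw [← Int.natCast_shiftRight, show (7:Int) = ((7:Nat):Int) by norm_num,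
        PySem.Int.band_natCast, mFun_extract x y z N n (by omega)]
    rw [grayLoop, ih (by omega)]
    simp only [hext]
    rw [castShiftRight, PySem.Int.bxor_natCast, PySem.Int.bor_comm]
    have : grayN (bFun x y z n) < 8 := grayN_lt _ (mortonBits_spec x y z n).2
    have h := int_shl_or (grayN (bFun x y z n)) (sFun x y z n) (3*n)
      (by rw [← pow8]; exact sFun_lt x y z n)
    rw [show bFun x y z n ^^^ bFun x y z n >>> 1 = grayN (bFun x y z n) from rfl, h]
    simp only [sFun, pow8]
    push_cast
    ring

-- A's fused loop computes the same Nat index model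
lemma hilbertLoopA_eq (x y z : Int) :
    ∀ (n : Nat) (acc : Nat),
      hilbertLoopA x y z n ((acc : Nat) : Int) = ((acc * 8^n + sFun x y z n : Nat) : Int) := by
  intro n
  induction n with
  | zero => intro acc; simp [hilbertLoopA, sFun]
  | succ n ih =>
    intro acc
    have hstep : hilbertLoopA x y z (n+1) ((acc : Nat) : Int)
        = hilbertLoopA x y z n
            (PySem.Int.bor (((acc : Nat) : Int) <<< 3) (gray_encode_3bit_py (mortonBits x y z n))) := rfl
    have hb := mortonBits_spec x y z n
    have hg : gray_encode_3bit_py (mortonBits x y z n) = ((grayN (bFun x y z n) : Nat) : Int) := by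
      rw [gray_encode_3bit_py, hb.1, castShiftRight, PySem.Int.bxor_natCast]
      rfl
    have hor : PySem.Int.bor (((acc : Nat) : Int) <<< 3) ((grayN (bFun x y z n) : Nat) : Int)
        = ((acc * 2^3 + grayN (bFun x y z n) : Nat) : Int) :=
      int_shl_or acc (grayN (bFun x y z n)) 3 (grayN_lt _ hb.2)
    rw [hstep, hg, hor, ih]
    simp only [sFun]
    push_cast
    ring

-- ===== VERDICT (by name: the statement is the Claim_ definition above) =====
theorem hilbert_3d_encode_py_spec : Claim_equal_hilbert_3d_encode_py := by
  intro x y z order _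
  unfold Spec_hilbert_3d_encode_py hilbert_3d_encode_py hilbert_3d_encode_py_alt
  rw [mortonLoop_eq, grayLoop_eq x y z order.toNat order.toNat (le_refl _),
    show (0:Int) = ((0:Nat):Int) by norm_num, hilbertLoopA_eq]
  norm_num
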